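-- pv_equiv track=rewrite | github.com/RJW34/fouler-play | pre_flight_check.py | _calculate_quota
-- ===== SOURCE A (Python) =====
-- from typing import List, Tuple, Optional
--
-- def _calculate_quota(run_count: int, num_workers: int) -> List[int]:
--     """Calculate per-worker quotas exactly as run.py does"""
--     if num_workers > 1 and run_count <= 999999:
--         base = run_count // num_workers
--         remainder = run_count % num_workers
--         quotas = [base + (1 if i < remainder else 0) for i in range(num_workers)]
--         return quotas
--     else:
--         return [0] * num_workers  # 0 = no per-worker limit
-- ===== SOURCE B (Python) =====
-- from typing import List
--
-- def _calculate_quota(run_count: int, num_workers: int) -> List[int]: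
--     """Calculate per-worker quotas exactly as run.py does"""
--     if num_workers > 1 and run_count <= 999999:
--         # repeatedly give the next worker the ceiling of an even share of
--         # what is still undistributed; no base/remainder is ever computed
--         quotas = []
--         remaining = run_count
--         for k in range(num_workers, 0, -1):
--             q = -(-remaining // k)
--             quotas.append(q)
--             remaining -= q
--         return quotas
--     else:
--         return [0] * num_workers  # 0 = no per-worker limit
-- ===== Notes on version B (the rewrite author's own statement) =====
-- stated objective: alternative
-- what changed: Instead of computing base = run_count // num_workers and remainder once and testing i < remainder per worker, B never computes a remainder: it loops over the workers giving each the ceiling -(-remaining // k) of an even share of what is still undistributed and subtracts it, which provably front-loads the extra units exactly as A does.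
import Mathlib
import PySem

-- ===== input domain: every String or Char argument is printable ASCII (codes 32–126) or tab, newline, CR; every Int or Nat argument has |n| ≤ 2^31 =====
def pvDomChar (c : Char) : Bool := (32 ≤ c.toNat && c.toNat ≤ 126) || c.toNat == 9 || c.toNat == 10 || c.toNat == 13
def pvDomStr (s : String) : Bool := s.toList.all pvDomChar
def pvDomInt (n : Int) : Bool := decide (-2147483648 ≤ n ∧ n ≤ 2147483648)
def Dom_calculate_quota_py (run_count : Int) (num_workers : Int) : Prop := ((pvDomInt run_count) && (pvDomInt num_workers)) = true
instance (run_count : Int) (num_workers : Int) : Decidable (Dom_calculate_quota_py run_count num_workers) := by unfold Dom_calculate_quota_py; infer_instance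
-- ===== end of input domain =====

-- B distributes the total by repeated ceiling division of what is still undistributed,
-- never computing base/remainder (alternative algorithm, same cost).
-- ===== PORT A =====
def calculate_quota_py (run_count : Int) (num_workers : Int) : List Int :=
  if num_workers > 1 ∧ run_count ≤ 999999 then
    let base := PySem.Int.floordiv run_count num_workers
    let remainder := PySem.Int.mod run_count num_workers
    let quotas := (PySem.List.pyRange 0 num_workers 1).map
      (fun i => base + (if i < remainder then 1 else 0))
    quotas
  else
    List.replicate num_workers.toNat 0

-- ===== PORT B =====
def calculate_quota_py_alt (run_count : Int) (num_workers : Int) : List Int :=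
  if num_workers > 1 ∧ run_count ≤ 999999 then
    let st := (PySem.List.pyRange num_workers 0 (-1)).foldl
      (fun (st : List Int × Int) k =>
        let q := -(PySem.Int.floordiv (-st.2) k)
        (st.1 ++ [q], st.2 - q)) ([], run_count)
    st.1
  else
    List.replicate num_workers.toNat 0

-- ===== PRECONDITION & SPEC =====
def Spec_calculate_quota_py (run_count : Int) (num_workers : Int) (out : List Int) : Prop := out = calculate_quota_py_alt run_count num_workers
instance (run_count : Int) (num_workers : Int) (out : List Int) : Decidable (Spec_calculate_quota_py run_count num_workers out) := by unfold Spec_calculate_quota_py; infer_instance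

-- ===== CLAIM =====
def Claim_equal_calculate_quota_py : Prop := ∀ (run_count : Int) (num_workers : Int), Dom_calculate_quota_py run_count num_workers → Spec_calculate_quota_py run_count num_workers (calculate_quota_py run_count num_workers)

-- ===== LEMMAS AND PROOFS =====

-- B's ceiling step: -((-rem) // n) = rem // n + (1 if rem % n > 0 else 0), for n > 0
theorem ceil_step (rem n : Int) (hn : 0 < n) :
    -(PySem.Int.floordiv (-rem) n)
      = PySem.Int.floordiv rem n + (if 0 < PySem.Int.mod rem n then 1 else 0) := by
  have hsum := PySem.Int.floordiv_mul_add_mod rem n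
  have hr0 : 0 ≤ PySem.Int.mod rem n := PySem.Int.mod_nonneg rem hn
  have hrlt : PySem.Int.mod rem n < n := PySem.Int.mod_lt rem hn
  rw [PySem.Int.neg_floordiv_neg_eq_iff_of_pos hn]
  by_cases h : 0 < PySem.Int.mod rem n <;> simp [h] <;> constructor <;> nlinarith

-- The countdown fold of B produces exactly A's comprehension values
theorem fair_fold (k : Nat) : ∀ (rem : Int) (acc : List Int),
    ((PySem.List.pyRange (k : Int) 0 (-1)).foldl
      (fun (st : List Int × Int) j =>
        let q := -(PySem.Int.floordiv (-st.2) j)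
        (st.1 ++ [q], st.2 - q)) (acc, rem)).1
    = acc ++ (List.range k).map
        (fun (i : Nat) => PySem.Int.floordiv rem k + (if (i : Int) < PySem.Int.mod rem k then 1 else 0)) := by
  induction k with
  | zero => intro rem acc; simp [PySem.List.pyRange_neg_one_eq_nil (by norm_num : (0:Int) ≤ 0)]
  | succ k ih =>
    intro rem acc
    have hn : (0:Int) < (k:Int) + 1 := by positivity
    rw [show ((k+1 : Nat) : Int) = (k:Int) + 1 by push_cast; ring,
        PySem.List.pyRange_neg_one_cons hn, List.foldl_cons]
    simp only [show (k:Int) + 1 - 1 = (k:Int) by ring]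
    set b := PySem.Int.floordiv rem ((k:Int)+1) with hb
    set r := PySem.Int.mod rem ((k:Int)+1) with hr
    set c : Int := if 0 < r then 1 else 0 with hc
    have hq : -(PySem.Int.floordiv (-rem) ((k:Int)+1)) = b + c := ceil_step rem _ hn
    have hsum : b * ((k:Int)+1) + r = rem := PySem.Int.floordiv_mul_add_mod rem _
    have hr0 : 0 ≤ r := PySem.Int.mod_nonneg rem hn
    have hrlt : r < (k:Int) + 1 := PySem.Int.mod_lt rem hn
    rw [hq, ih (rem - (b + c)) (acc ++ [b + c]), List.append_assoc]
    congr 1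
    rw [List.range_succ_eq_map, List.map_cons, List.map_map, List.singleton_append]
    have hcval : (0 < r ∧ c = 1) ∨ (r = 0 ∧ c = 0) := by
      by_cases h : 0 < r
      · left; exact ⟨h, by simp [hc, h]⟩
      · right; exact ⟨by omega, by simp [hc, h]⟩
    refine List.cons_eq_cons.mpr ⟨?_, ?_⟩
    · rcases hcval with ⟨h1, h2⟩ | ⟨h1, h2⟩ <;> simp [h1, h2]
    · rcases Nat.eq_zero_or_pos k with hk | hk
      · subst hk; simp
      have hkpos : (0:Int) < (k:Int) := by exact_mod_cast hk
      have hsub : rem - (b + c) = b * (k:Int) + (r - c) := by linarith [hsum]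
      have hrc0 : 0 ≤ r - c := by rcases hcval with ⟨h1, h2⟩ | ⟨h1, h2⟩ <;> omega
      have hrck : r - c < (k:Int) := by rcases hcval with ⟨h1, h2⟩ | ⟨h1, h2⟩ <;> omega
      have hb' : PySem.Int.floordiv (rem - (b + c)) (k:Int) = b := by
        rw [PySem.Int.floordiv_eq_iff_of_pos hkpos]
        constructor <;> nlinarith
      have hr' : PySem.Int.mod (rem - (b + c)) (k:Int) = r - c := by
        have h2 := PySem.Int.floordiv_mul_add_mod (rem - (b + c)) (k:Int)
        rw [hb'] at h2; linarith
      apply List.map_congr_left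
      intro i _
      simp only [Function.comp, hb', hr']
      congr 1
      have hi0 : (0:Int) ≤ (i:Int) := Int.natCast_nonneg i
      have hcast : ((Nat.succ i : Nat) : Int) = (i:Int) + 1 := by push_cast; ring
      have hiff : ((i:Int) < r - c) ↔ ((i:Int) + 1 < r) := by
        rcases hcval with ⟨h1, h2⟩ | ⟨h1, h2⟩ <;> omega
      rw [hcast]
      simp only [hiff]

-- ===== VERDICT =====
theorem calculate_quota_py_spec : Claim_equal_calculate_quota_py := by
  intro run_count num_workers _
  unfold Spec_calculate_quota_py calculate_quota_py calculate_quota_py_alt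
  by_cases hc : num_workers > 1 ∧ run_count ≤ 999999
  · simp only [hc]
    have hnw : (0:Int) < num_workers := by omega
    have hcast : ((num_workers.toNat : Nat) : Int) = num_workers := Int.toNat_of_nonneg (le_of_lt hnw)
    rw [show num_workers = ((num_workers.toNat : Nat) : Int) from hcast.symm]
    rw [fair_fold num_workers.toNat run_count []]
    rw [PySem.List.pyRange_one 0 ((num_workers.toNat : Nat) : Int), List.map_map]
    simp only [List.nil_append, Int.sub_zero, Int.toNat_natCast, and_self, if_true]
    apply List.map_congr_left
    intro i _
    simp [Function.comp]
  · simp only [hc, if_neg, not_false_iff]
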